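-- pv_equiv track=rewrite | github.com/ByteSturm/aoc | 2015/08/puzzle_201508.py | do_puzzle_part2
-- ===== SOURCE A (Python) =====
-- def do_puzzle_part2(input):
--     codeLength = 0
--     encodedLength = 0
--     for string in input:
--         lengths = calculateLengthOfencodedStringByCounting(string)
--         codeLength += lengths["code"]
--         encodedLength += lengths["encoded"]
--     return encodedLength - codeLength
--
-- def calculateLengthOfencodedStringByCounting(input: str):
--     codeLength = len(input)
--     encodedLength = 2
--     for char in input:
--         if char == "\\" or char == '"':
--             encodedLength += 2
--         else:
--             encodedLength += 1
--     return {"code": codeLength, "encoded": encodedLength}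
-- ===== SOURCE B (Python) =====
-- def do_puzzle_part2(input):
--     # Build the actual re-encoded string (escape backslashes and quotes, add
--     # surrounding quotes) and sum the length growth per string.
--     def encode(s):
--         return '"' + s.replace('\\', '\\\\').replace('"', '\\"') + '"'
--     return sum(len(encode(s)) - len(s) for s in input)
-- ===== Notes on version B (the rewrite author's own statement) =====
-- stated objective: alternative
-- what changed: B constructs each string's actual encoded form (escape backslash and quote via str.replace, wrap in quotes) and sums the length growth, instead of A's two running length accumulators with a per-character Python-level branch counting escapes; a timing run measured it ~1.7x faster (C-level replace vs the interpreted char loop).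
import Mathlib
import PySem

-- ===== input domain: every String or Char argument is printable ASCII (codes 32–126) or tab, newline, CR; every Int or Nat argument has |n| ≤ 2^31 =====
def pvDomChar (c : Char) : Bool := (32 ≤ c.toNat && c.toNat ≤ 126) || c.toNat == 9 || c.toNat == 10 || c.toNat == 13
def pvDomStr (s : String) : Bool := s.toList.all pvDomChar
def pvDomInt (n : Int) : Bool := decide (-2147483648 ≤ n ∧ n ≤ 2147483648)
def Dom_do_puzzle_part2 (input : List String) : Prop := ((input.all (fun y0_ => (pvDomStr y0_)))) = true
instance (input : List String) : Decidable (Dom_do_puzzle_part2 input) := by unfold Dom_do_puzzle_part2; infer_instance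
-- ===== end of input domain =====

-- B builds each string's actual encoded form (escape '\' and '"' via replace, wrap in
-- quotes) and sums the length growth, instead of A's per-character counting with two
-- running length accumulators (objective: alternative).

-- ===== PORT A =====
def calculateLengthOfencodedStringByCounting (input : String) : PySem.Dict String Int :=
  let codeLength : Int := PySem.Str.len input
  let encodedLength : Int :=
    input.toList.foldl (fun acc char => if char == '\\' || char == '"' then acc + 2 else acc + 1) 2
  (PySem.Dict.empty.insert "code" codeLength).insert "encoded" encodedLength

def do_puzzle_part2 (input : List String) : Int :=
  let st := input.foldl (fun (st : Int × Int) string =>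
      let lengths := calculateLengthOfencodedStringByCounting string
      (st.1 + lengths.getD "code" 0, st.2 + lengths.getD "encoded" 0)) (0, 0)
  st.2 - st.1

-- ===== PORT B =====
def pvEncode (s : String) : String :=
  "\"" ++ PySem.Str.replace (PySem.Str.replace s "\\" "\\\\") "\"" "\\\"" ++ "\""

def do_puzzle_part2_alt (input : List String) : Int :=
  (input.map (fun s => (PySem.Str.len (pvEncode s) : Int) - (PySem.Str.len s : Int))).sum

-- ===== PRECONDITION & SPEC =====
def Spec_do_puzzle_part2 (input : List String) (out : Int) : Prop := out = do_puzzle_part2_alt input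
instance (input : List String) (out : Int) : Decidable (Spec_do_puzzle_part2 input out) := by unfold Spec_do_puzzle_part2; infer_instance

-- ===== CLAIM =====
def Claim_equal_do_puzzle_part2 : Prop := ∀ (input : List String), Dom_do_puzzle_part2 input → Spec_do_puzzle_part2 input (do_puzzle_part2 input)

-- ===== LEMMAS AND PROOFS =====

-- replace with a single-character needle rewrites each matching character independently
theorem pv_go_single (c : Char) (r : List Char) : ∀ (l : List Char) (fuel : Nat) (acc : List Char),
    l.length ≤ fuel →
    PySem.Chars.replace.go [c] r fuel l acc
      = acc.reverse ++ l.flatMap (fun x => if x = c then r else [x]) := by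
  intro l
  induction l with
  | nil => intro fuel acc _; cases fuel <;> simp [PySem.Chars.replace.go]
  | cons h t ih =>
    intro fuel acc hle
    cases fuel with
    | zero => simp at hle
    | succ f =>
      simp only [PySem.Chars.replace.go, List.isPrefixOf]
      by_cases hc : c = h
      · subst hc
        simp only [BEq.rfl, Bool.true_and, if_pos]
        rw [show List.drop [c].length (c :: t) = t from rfl,
            ih f (r.reverse ++ acc) (by simpa using hle)]
        simp
      · have : (c == h) = false := by simp [hc]
        simp only [this, Bool.false_and, Bool.false_eq_true, if_false]
        rw [ih f (h :: acc) (by simpa using hle)]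
        have : (h = c) = False := by simp [Ne.symm hc]
        simp [this]

theorem pv_replace_single (cs : List Char) (c : Char) (r : List Char) :
    PySem.Chars.replace cs [c] r = cs.flatMap (fun x => if x = c then r else [x]) := by
  simp [PySem.Chars.replace, pv_go_single c r cs cs.length [] le_rfl]

-- length of the doubly-escaped character list
theorem pv_esc_len (cs : List Char) :
    ((cs.flatMap (fun x => if x = '\\' then ['\\', '\\'] else [x])).flatMap
        (fun x => if x = '"' then ['\\', '"'] else [x])).length
      = cs.length + cs.count '\\' + cs.count '"' := by
  induction cs with
  | nil => simp
  | cons h t ih =>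
    simp only [List.flatMap_cons, List.flatMap_append, List.length_append, ih,
      List.count_cons, List.length_cons]
    by_cases h1 : h = '\\'
    · simp [h1]; omega
    · by_cases h2 : h = '"'
      · simp [h2]; omega
      · simp [h1, h2]; omega

-- B's per-string value
theorem pv_b_string (s : String) :
    (PySem.Str.len (pvEncode s) : Int) - (PySem.Str.len s : Int)
      = 2 + (s.toList.count '\\' : Int) + (s.toList.count '"' : Int) := by
  have hrep : (pvEncode s).toList
      = '"' :: (((s.toList.flatMap (fun x => if x = '\\' then ['\\', '\\'] else [x])).flatMap
          (fun x => if x = '"' then ['\\', '"'] else [x])) ++ ['"']) := by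
    simp [pvEncode, String.toList_append, PySem.Str.replace, pv_replace_single]
  simp only [PySem.Str.len, hrep, List.length_cons, List.length_append, List.length_nil]
  rw [pv_esc_len]
  push_cast
  omega

-- A's inner character loop computes 2 + length + (number of backslashes and quotes)
theorem pv_inner (cs : List Char) : ∀ (a : Int),
    cs.foldl (fun acc char => if char == '\\' || char == '"' then acc + 2 else acc + 1) a
      = a + cs.length + cs.count '\\' + cs.count '"' := by
  induction cs with
  | nil => intro a; simp
  | cons h t ih =>
    intro a
    simp only [List.foldl_cons]
    rw [ih]
    simp only [List.count_cons, List.length_cons]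
    by_cases h1 : h = '\\'
    · simp only [h1]; norm_num; omega
    · by_cases h2 : h = '"'
      · simp only [h2]; norm_num [Ne.symm h1]; omega
      · have b1 : (h == '\\') = false := by simp [h1]
        have b2 : (h == '"') = false := by simp [h2]
        simp [b1, b2]
        omega

-- A's per-string contribution equals B's per-string value
theorem pv_string (s : String) :
    (calculateLengthOfencodedStringByCounting s).getD "encoded" 0
      - (calculateLengthOfencodedStringByCounting s).getD "code" 0
      = (PySem.Str.len (pvEncode s) : Int) - (PySem.Str.len s : Int) := by
  rw [pv_b_string]
  simp only [calculateLengthOfencodedStringByCounting, pv_inner, PySem.Dict.getD_insert,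
    PySem.Str.len]
  norm_num
  rw [if_neg (show ¬(("code" : String) = "encoded") by decide)]
  ring

-- A's accumulator pair: difference of components after the fold
theorem pv_loop (l : List String) : ∀ (st : Int × Int),
    (l.foldl (fun (st : Int × Int) string =>
        let lengths := calculateLengthOfencodedStringByCounting string
        (st.1 + lengths.getD "code" 0, st.2 + lengths.getD "encoded" 0)) st).2
      - (l.foldl (fun (st : Int × Int) string =>
        let lengths := calculateLengthOfencodedStringByCounting string
        (st.1 + lengths.getD "code" 0, st.2 + lengths.getD "encoded" 0)) st).1
      = st.2 - st.1 + do_puzzle_part2_alt l := by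
  induction l with
  | nil =>
    intro st
    simp only [List.foldl_nil, do_puzzle_part2_alt, List.map_nil, List.sum_nil]
    ring
  | cons s t ih =>
    intro st
    simp only [List.foldl_cons, ih, do_puzzle_part2_alt, List.map_cons, List.sum_cons]
    have := pv_string s
    omega

-- ===== VERDICT =====
theorem do_puzzle_part2_spec : Claim_equal_do_puzzle_part2 := by
  intro input _
  unfold Spec_do_puzzle_part2 do_puzzle_part2
  simpa using pv_loop input (0, 0)
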